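-- pv_equiv track=rewrite | github.com/extremenetworks/ansible_collections.extreme.fe | ansible_collections/extreme/fe/plugins/modules/extreme_fe_vlans.py | _remove_membership_entry
-- ===== SOURCE A (Python) =====
-- from typing import Any, Dict, List, Optional, Set, Tuple
--
-- def _membership_key(entry: Dict[str, str]) -> Tuple[str, str]:
--     return (str(entry.get("interfaceType", "")).upper(), str(entry.get("interfaceName", "")))
--
-- def _remove_membership_entry(entries: List[Dict[str, str]], key: Tuple[str, str]) -> bool:
--     removed = False
--     filtered: List[Dict[str, str]] = []
--     for entry in entries:
--         if not removed and _membership_key(entry) == key: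
--             removed = True
--             continue
--         filtered.append(entry)
--     if removed:
--         entries[:] = filtered
--     return removed
-- ===== SOURCE B (Python) =====
-- from typing import Dict, List, Tuple
--
-- def _membership_key(entry: Dict[str, str]) -> Tuple[str, str]:
--     return (str(entry.get("interfaceType", "")).upper(), str(entry.get("interfaceName", "")))
--
-- def _remove_membership_entry(entries: List[Dict[str, str]], key: Tuple[str, str]) -> bool:
--     idx = None
--     for i, entry in enumerate(entries):
--         if _membership_key(entry) == key:
--             idx = i
--             break
--     if idx is None:
--         return False
--     del entries[idx]
--     return True
-- ===== Notes on version B (the rewrite author's own statement) =====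
-- stated objective: simpler
-- what changed: Locate the first matching entry with an early-break enumerate scan and delete it in place by index, instead of copying every non-removed entry into a filtered list and slice-assigning it back.
import Mathlib
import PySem

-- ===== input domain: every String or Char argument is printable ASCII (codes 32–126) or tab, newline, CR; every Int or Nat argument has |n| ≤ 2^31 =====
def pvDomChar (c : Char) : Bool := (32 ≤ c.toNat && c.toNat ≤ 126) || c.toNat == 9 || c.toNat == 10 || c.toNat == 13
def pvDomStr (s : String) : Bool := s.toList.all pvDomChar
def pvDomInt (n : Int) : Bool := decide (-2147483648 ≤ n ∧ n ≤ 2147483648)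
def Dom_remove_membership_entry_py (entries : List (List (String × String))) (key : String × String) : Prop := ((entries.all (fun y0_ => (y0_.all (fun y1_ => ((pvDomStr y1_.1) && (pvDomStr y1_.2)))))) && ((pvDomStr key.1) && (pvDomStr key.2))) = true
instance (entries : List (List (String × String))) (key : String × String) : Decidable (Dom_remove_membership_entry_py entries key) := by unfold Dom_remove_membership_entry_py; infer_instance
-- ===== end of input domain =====

-- B replaces A's copy-and-slice-assign pass by an early-break locate-then-delete-by-index (simpler); both Pythons mutate `entries` identically, and the theorems are about the return value.
-- ===== PORT A =====
-- _membership_key: (entry.get("interfaceType","").upper(), entry.get("interfaceName",""))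
def membershipKeyA (entry : List (String × String)) : String × String :=
  (PySem.Str.upper (PySem.Dict.getD (PySem.Dict.ofList entry) "interfaceType" ""), PySem.Dict.getD (PySem.Dict.ofList entry) "interfaceName" "")

def remove_membership_entry_py (entries : List (List (String × String))) (key : String × String) : Bool :=
  -- fold carrying (removed, filtered); the return value is the removed flag
  (entries.foldl
    (fun (st : Bool × List (List (String × String))) entry =>
      if !st.1 && (membershipKeyA entry == key) then (true, st.2)
      else (st.1, st.2 ++ [entry]))
    (false, [])).1

-- ===== PORT B =====
-- B: early-break enumerate scan for the first matching index; found index => True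
def membershipKeyB (entry : List (String × String)) : String × String :=
  (PySem.Str.upper (PySem.Dict.getD (PySem.Dict.ofList entry) "interfaceType" ""), PySem.Dict.getD (PySem.Dict.ofList entry) "interfaceName" "")

def findMatchIdxB (entries : List (List (String × String))) (key : String × String) (i : Nat) : Option Nat :=
  match entries with
  | [] => none
  | e :: rest => if membershipKeyB e == key then some i else findMatchIdxB rest key (i + 1)

def remove_membership_entry_py_alt (entries : List (List (String × String))) (key : String × String) : Bool :=
  match findMatchIdxB entries key 0 with
  | none => false
  | some _ => true

-- ===== PRECONDITION & SPEC =====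
def Spec_remove_membership_entry_py (entries : List (List (String × String))) (key : String × String) (out : Bool) : Prop := out = remove_membership_entry_py_alt entries key
instance (entries : List (List (String × String))) (key : String × String) (out : Bool) : Decidable (Spec_remove_membership_entry_py entries key out) := by unfold Spec_remove_membership_entry_py; infer_instance

-- ===== CLAIM (what is proved, stated in full; the proofs are below) =====
def Claim_equal_remove_membership_entry_py : Prop := ∀ (entries : List (List (String × String))) (key : String × String), Dom_remove_membership_entry_py entries key → Spec_remove_membership_entry_py entries key (remove_membership_entry_py entries key)

-- ===== LEMMAS AND PROOFS =====

-- ===== VERDICT (by name: the statement is the Claim_ definition above) =====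
lemma foldA_true (key : String × String) :
    ∀ (entries : List (List (String × String))) (l : List (List (String × String))),
      (entries.foldl
        (fun (st : Bool × List (List (String × String))) entry =>
          if !st.1 && (membershipKeyA entry == key) then (true, st.2)
          else (st.1, st.2 ++ [entry])) (true, l)).1 = true := by
  intro entries
  induction entries with
  | nil => intro l; rfl
  | cons e rest ih =>
    intro l
    simp only [List.foldl_cons]
    rw [if_neg (by simp)]
    exact ih _

lemma foldA_fst (key : String × String) :
    ∀ (entries : List (List (String × String))) (l : List (List (String × String))),
      (entries.foldl
        (fun (st : Bool × List (List (String × String))) entry =>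
          if !st.1 && (membershipKeyA entry == key) then (true, st.2)
          else (st.1, st.2 ++ [entry])) (false, l)).1
      = entries.any (fun e => membershipKeyA e == key) := by
  intro entries
  induction entries with
  | nil => intro l; rfl
  | cons e rest ih =>
    intro l
    simp only [List.foldl_cons, List.any_cons]
    by_cases hm : (membershipKeyA e == key) = true
    · rw [if_pos (by simp [hm])]
      rw [hm, Bool.true_or]
      exact foldA_true key rest l
    · simp only [Bool.not_eq_true] at hm
      rw [if_neg (by simp [hm])]
      rw [hm, Bool.false_or]
      exact ih _

lemma findB_isSome (key : String × String) :
    ∀ (entries : List (List (String × String))) (i : Nat),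
      (findMatchIdxB entries key i).isSome = entries.any (fun e => membershipKeyB e == key) := by
  intro entries
  induction entries with
  | nil => intro i; simp [findMatchIdxB]
  | cons e rest ih =>
    intro i
    by_cases hm : (membershipKeyB e == key) = true
    · simp [findMatchIdxB, hm]
    · simp only [Bool.not_eq_true] at hm
      simp [findMatchIdxB, hm, ih]

lemma alt_eq_any (entries : List (List (String × String))) (key : String × String) :
    remove_membership_entry_py_alt entries key = entries.any (fun e => membershipKeyB e == key) := by
  unfold remove_membership_entry_py_alt
  rw [← findB_isSome key entries 0]
  cases findMatchIdxB entries key 0 <;> rfl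

theorem remove_membership_entry_py_spec : Claim_equal_remove_membership_entry_py := by
  intro entries key _
  unfold Spec_remove_membership_entry_py
  unfold remove_membership_entry_py
  rw [foldA_fst, alt_eq_any]
  rfl
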